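-- pv_equiv track=rewrite | github.com/cd-public/Isadora_soc | utils/times.py | to_dt
-- ===== SOURCE A (Python) =====
-- def last_val_to_str(last, val, strings):
-- 	if last == "": # uninitialized case, return nothing
-- 		return ""
-- 	if "x" in val or "z" in val:
-- 		val_str = "-1"
-- 	else:
-- 		val_str = str(int(val,2))
-- 	val_str = "\"" + val_str + "\""
-- 	return last + "\n" + val_str + "\n1\n"
--
-- def to_dt(key, strings):
-- 	ret_str = ""
-- 	last = ""
-- 	val = 'x' # default uninitialized value
-- 	for reg in key:
-- 		# figure out how to use strings array in here
-- 		curr = reg[2].split()[0]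
-- 		if curr != last:
-- 			# new reg, so write last reg
-- 			ret_str = ret_str + last_val_to_str(last, val, strings)
-- 			# save new reg and its value
-- 			last = curr
-- 			val = reg[3]
-- 		elif curr == last:
-- 			# additional bits within the same register, update value
-- 			val = val + reg[3]
-- 	# close out given the offset of one in the loop
-- 	ret_str = ret_str + last_val_to_str(last, val, strings) + "\n"
-- 	return ret_str
-- ===== SOURCE B (Python) =====
-- def to_dt(key, strings):
--     # Pass 1: group consecutive entries into runs of (label, concatenated bits).
--     runs = []
--     for reg in key:
--         label = reg[2].split()[0]
--         if runs and runs[-1][0] == label: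
--             runs[-1][1] += reg[3]
--         else:
--             runs.append([label, reg[3]])
--     # Pass 2: format each run, then join.
--     parts = []
--     for label, bits in runs:
--         num = -1 if ('x' in bits or 'z' in bits) else int(bits, 2)
--         parts.append(label + '\n"' + str(num) + '"\n1\n')
--     return ''.join(parts) + '\n'
-- ===== Notes on version B (the rewrite author's own statement) =====
-- stated objective: simpler
-- what changed: Replaced A's single-pass running-state machine (last/val with change detection and a deferred close-out emit) by two staged passes: group consecutive entries into (label, bits) runs, then format each run and join; Pre_ excludes only the inputs where A raises (reg[2] with no words, or a run whose bits are neither x/z-marked nor int(.,2)-parsable).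
import Mathlib
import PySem

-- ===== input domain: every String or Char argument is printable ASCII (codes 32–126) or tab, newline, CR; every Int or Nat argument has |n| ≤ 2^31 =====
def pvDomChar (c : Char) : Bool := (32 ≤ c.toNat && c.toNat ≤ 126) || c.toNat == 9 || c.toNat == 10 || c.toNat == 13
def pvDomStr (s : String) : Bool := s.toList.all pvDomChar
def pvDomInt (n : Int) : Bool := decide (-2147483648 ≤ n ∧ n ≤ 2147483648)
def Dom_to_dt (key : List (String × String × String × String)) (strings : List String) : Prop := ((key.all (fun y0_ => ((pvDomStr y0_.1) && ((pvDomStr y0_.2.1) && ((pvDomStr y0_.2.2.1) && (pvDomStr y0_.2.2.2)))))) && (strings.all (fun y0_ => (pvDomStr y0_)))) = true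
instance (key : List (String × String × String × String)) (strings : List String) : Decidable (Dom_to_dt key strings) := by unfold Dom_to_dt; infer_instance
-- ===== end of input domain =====

-- B replaces A's running-state change-detection machine by two staged passes (group consecutive
-- entries into runs, then format each run); objective: simpler. Return-value equivalence only.

-- ===== PORT A =====
-- none = the Python call raised (ValueError from int(val, 2)); IndexError from split()[0] is
-- handled in the loop below.
def last_val_to_str (last val : String) (strings : List String) : Option String :=
  if last == "" then some "" else
    let valStr? : Option String :=
      if PySem.Str.isIn "x" val || PySem.Str.isIn "z" val then some "-1"
      else (PySem.Int.ofStrBase? val 2).map PySem.Int.toStr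
    match valStr? with
    | none => none
    | some v => some (last ++ "\n" ++ ("\"" ++ v ++ "\"") ++ "\n1\n")

-- A's for-loop; state (ret_str, last, val); none = a raise (IndexError/ValueError)
def pvLoopA (strings : List String) : (String × String × String) → List (String × String × String × String) → Option (String × String × String)
  | st, [] => some st
  | (ret, last, val), reg :: rest =>
    match (PySem.Str.split₀ reg.2.2.1).head? with
    | none => none
    | some curr =>
      if curr ≠ last then
        match last_val_to_str last val strings with
        | none => none
        | some s => pvLoopA strings (ret ++ s, curr, reg.2.2.2) rest
      else pvLoopA strings (ret, last, val ++ reg.2.2.2) rest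

-- the close-out after the loop; "" on none (Python raised; those inputs are outside Pre_)
def pvFinishA (strings : List String) : Option (String × String × String) → String
  | none => ""
  | some (ret, last, val) =>
    match last_val_to_str last val strings with
    | none => ""
    | some s => ret ++ s ++ "\n"

def to_dt (key : List (String × String × String × String)) (strings : List String) : String :=
  pvFinishA strings (pvLoopA strings ("", "", "x") key)

-- ===== PORT B =====
-- Source B pass 1: runs kept in REVERSE order (head = runs[-1]); none = a raise
def pvLoopB : List (String × String) → List (String × String × String × String) → Option (List (String × String))
  | runs, [] => some runs
  | runs, reg :: rest =>
    match (PySem.Str.split₀ reg.2.2.1).head? with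
    | none => none
    | some label =>
      match runs with
      | (l, v) :: rs =>
        if l == label then pvLoopB ((l, v ++ reg.2.2.2) :: rs) rest
        else pvLoopB ((label, reg.2.2.2) :: (l, v) :: rs) rest
      | [] => pvLoopB [(label, reg.2.2.2)] rest

-- Source B pass 2 body for one run; none = a raise from int(bits, 2)
def pvFormat (r : String × String) : Option String :=
  let num? : Option Int :=
    if PySem.Str.isIn "x" r.2 || PySem.Str.isIn "z" r.2 then some (-1) else PySem.Int.ofStrBase? r.2 2
  num?.map (fun n => r.1 ++ "\n\"" ++ PySem.Int.toStr n ++ "\"\n1\n")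

def pvFmtAll : List (String × String) → Option (List String)
  | [] => some []
  | r :: rs =>
    match pvFormat r, pvFmtAll rs with
    | some s, some ps => some (s :: ps)
    | _, _ => none

def pvFinishB : Option (List (String × String)) → String
  | none => ""
  | some rruns =>
    match pvFmtAll rruns.reverse with
    | none => ""
    | some parts => PySem.Str.join "" parts ++ "\n"

def to_dt_alt (key : List (String × String × String × String)) (strings : List String) : String :=
  pvFinishB (pvLoopB [] key)

-- ===== PRECONDITION & SPEC =====
-- the consecutive runs (label, concatenated bits), label = first word of reg[2] (independent of the ports)
def pvRuns (key : List (String × String × String × String)) : List (String × String) :=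
  (key.foldl (fun runs reg =>
     let label := ((PySem.Str.split₀ reg.2.2.1).head?).getD ""
     match runs with
     | (l, v) :: rs => if l == label then (l, v ++ reg.2.2.2) :: rs else (label, reg.2.2.2) :: (l, v) :: rs
     | [] => [(label, reg.2.2.2)]) []).reverse

-- Pre_ excludes exactly the inputs on which Python A raises: a reg[2] with no words (IndexError
-- from split()[0]) or a run whose concatenated bits contain no 'x'/'z' and are not int(·, 2)-parsable
-- (ValueError).
def Pre_to_dt (key : List (String × String × String × String)) (strings : List String) : Prop :=
  (∀ reg ∈ key, PySem.Str.split₀ reg.2.2.1 ≠ []) ∧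
  (∀ r ∈ pvRuns key, PySem.Str.isIn "x" r.2 = true ∨ PySem.Str.isIn "z" r.2 = true ∨
    (PySem.Int.ofStrBase? r.2 2).isSome = true)
instance (key : List (String × String × String × String)) (strings : List String) : Decidable (Pre_to_dt key strings) := by unfold Pre_to_dt; infer_instance
def pvWitness_to_dt : (List (String × String × String × String)) × List String :=
  ([("a", "b", "r1 q", "1"), ("a", "b", "r1", "0"), ("a", "b", "r2", "xz")], ["s"])

def Spec_to_dt (key : List (String × String × String × String)) (strings : List String) (out : String) : Prop := out = to_dt_alt key strings
instance (key : List (String × String × String × String)) (strings : List String) (out : String) : Decidable (Spec_to_dt key strings out) := by unfold Spec_to_dt; infer_instance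

-- ===== CLAIM (what is proved, stated in full; the proofs are below) =====
def Claim_equal_to_dt : Prop := ∀ (key : List (String × String × String × String)) (strings : List String), Dom_to_dt key strings → Pre_to_dt key strings → Spec_to_dt key strings (to_dt key strings)

-- ===== LEMMAS AND PROOFS =====

-- every word produced by Python's str.split() is nonempty
theorem pv_split0_go_ne_nil (rest : List Char) : ∀ (cur : List Char) (acc : List (List Char)),
    (∀ w ∈ acc, w ≠ []) → ∀ w ∈ PySem.Chars.split₀.go rest cur acc, w ≠ [] := by
  induction rest with
  | nil =>
      intro cur acc hacc w hw
      unfold PySem.Chars.split₀.go at hw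
      by_cases hc : cur.isEmpty = true
      · rw [if_pos hc, List.mem_reverse] at hw
        exact hacc w hw
      · rw [if_neg hc, List.mem_reverse] at hw
        rcases List.mem_cons.mp hw with h | h
        · subst h
          simp only [ne_eq, List.reverse_eq_nil_iff]
          simpa [List.isEmpty_iff] using hc
        · exact hacc w h
  | cons c rest ih =>
      intro cur acc hacc w hw
      unfold PySem.Chars.split₀.go at hw
      by_cases hs : PySem.Chars.isspace c = true
      · by_cases hc : cur.isEmpty = true
        · rw [if_pos hs, if_pos hc] at hw
          exact ih [] acc hacc w hw
        · rw [if_pos hs, if_neg hc] at hw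
          refine ih [] (cur.reverse :: acc) ?_ w hw
          intro u hu
          rcases List.mem_cons.mp hu with h | h
          · subst h
            simp only [ne_eq, List.reverse_eq_nil_iff]
            simpa [List.isEmpty_iff] using hc
          · exact hacc u h
      · rw [if_neg hs] at hw
        exact ih (c :: cur) acc hacc w hw

theorem pv_head_split0_ne_empty {s curr : String}
    (h : (PySem.Str.split₀ s).head? = some curr) : curr ≠ "" := by
  have hmem : curr ∈ PySem.Str.split₀ s := List.mem_of_mem_head? (by simpa using h)
  unfold PySem.Str.split₀ at hmem
  rcases List.mem_map.mp hmem with ⟨w, hw, rfl⟩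
  have hne : w ≠ [] := by
    have := pv_split0_go_ne_nil (s.toList) [] [] (by simp)
    exact this w (by simpa [PySem.Chars.split₀] using hw)
  intro hcontra
  apply hne
  have : (String.ofList w).toList = "".toList := by rw [hcontra]
  simpa using this

theorem pv_fmtAll_append (a b : List (String × String)) :
    pvFmtAll (a ++ b) = match pvFmtAll a, pvFmtAll b with
      | some x, some y => some (x ++ y)
      | _, _ => none := by
  induction a with
  | nil => cases h : pvFmtAll b <;> simp [pvFmtAll, h]
  | cons r rs ih =>
      simp only [List.cons_append, pvFmtAll, ih]
      cases pvFormat r <;> cases pvFmtAll rs <;> cases pvFmtAll b <;> rfl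

theorem pv_fmtAll_of_bad {x : String × String} {l : List (String × String)}
    (hx : x ∈ l) (hbad : pvFormat x = none) : pvFmtAll l = none := by
  induction l with
  | nil => cases hx
  | cons r rs ih =>
      rcases List.mem_cons.mp hx with h | h
      · subst h; simp [pvFmtAll, hbad]
      · rw [pvFmtAll, ih h]
        cases pvFormat r <;> rfl

theorem pv_chars_join_snoc (l : List (List Char)) (s : List Char) :
    PySem.Chars.join [] (l ++ [s]) = PySem.Chars.join [] l ++ s := by
  induction l with
  | nil => simp [PySem.Chars.join_singleton, PySem.Chars.join_nil]
  | cons a t ih =>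
      cases t with
      | nil => simp [PySem.Chars.join_cons_cons, PySem.Chars.join_singleton]
      | cons b t' =>
          have h1 : (a :: b :: t') ++ [s] = a :: b :: (t' ++ [s]) := by simp
          rw [h1, PySem.Chars.join_cons_cons, PySem.Chars.join_cons_cons]
          have h2 : (b :: t') ++ [s] = b :: (t' ++ [s]) := by simp
          rw [← h2, ih]
          simp [List.append_assoc]

theorem pv_join_snoc (ps : List String) (s : String) :
    PySem.Str.join "" (ps ++ [s]) = PySem.Str.join "" ps ++ s := by
  apply String.ext
  simp [PySem.Str.join, pv_chars_join_snoc]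

-- formatting one closed run: both sides agree for a nonempty label
theorem pv_format_eq (last val : String) (strings : List String) (h : last ≠ "") :
    last_val_to_str last val strings = pvFormat (last, val) := by
  unfold last_val_to_str pvFormat
  rw [if_neg (by simpa using h)]
  by_cases hxz : (PySem.Str.isIn "x" val || PySem.Str.isIn "z" val) = true
  · rw [if_pos hxz]
    show _ = Option.map _ (if _ then some (-1 : Int) else _)
    rw [if_pos hxz, Option.map_some]
    have hm1 : PySem.Int.toStr (-1) = "-1" := by decide
    rw [hm1]
    apply congrArg
    apply String.ext
    simp

  · rw [if_neg hxz]
    show _ = Option.map _ (if _ then some (-1 : Int) else _)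
    rw [if_neg hxz]
    cases PySem.Int.ofStrBase? val 2 with
    | none => rfl
    | some n =>
        rw [Option.map_some, Option.map_some]
        apply congrArg
        apply String.ext
        simp

-- a run already buried in the tail is never touched again; its bad format forces "" in the end
theorem pv_finishB_bad (rest : List (String × String × String × String)) :
    ∀ (h : String × String) (t : List (String × String)),
    (∃ x ∈ t, pvFormat x = none) → pvFinishB (pvLoopB (h :: t) rest) = "" := by
  induction rest with
  | nil =>
      intro h t ⟨x, hx, hbad⟩
      have hnone : pvFmtAll (t.reverse ++ [h]) = none :=
        pv_fmtAll_of_bad (x := x) (by simp [hx]) hbad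
      simp [pvLoopB, pvFinishB, hnone]
  | cons reg rest ih =>
      intro h t hbad
      rw [pvLoopB]
      cases hfw : (PySem.Str.split₀ reg.2.2.1).head? with
      | none => simp [pvFinishB]
      | some label =>
          obtain ⟨l, v⟩ := h
          simp only
          by_cases hl : (l == label) = true
          · rw [if_pos hl]
            exact ih (l, v ++ reg.2.2.2) t hbad
          · rw [if_neg hl]
            refine ih (label, reg.2.2.2) ((l, v) :: t) ?_
            obtain ⟨x, hx, hbadx⟩ := hbad
            exact ⟨x, List.mem_cons_of_mem _ hx, hbadx⟩

-- the main invariant: A's state (join ps, last, val) corresponds to B's reversed runs (last, val) :: cr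
theorem pv_main (strings : List String) (rest : List (String × String × String × String)) :
    ∀ (last val : String) (cr : List (String × String)) (ps : List String),
    last ≠ "" → pvFmtAll cr.reverse = some ps →
    pvFinishA strings (pvLoopA strings (PySem.Str.join "" ps, last, val) rest)
      = pvFinishB (pvLoopB ((last, val) :: cr) rest) := by
  induction rest with
  | nil =>
      intro last val cr ps hlast hps
      show pvFinishA strings (some (PySem.Str.join "" ps, last, val))
        = pvFinishB (some ((last, val) :: cr))
      rw [pvFinishA, pvFinishB, pv_format_eq last val strings hlast]
      have hr : ((last, val) :: cr).reverse = cr.reverse ++ [(last, val)] := by simp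
      rw [hr, pv_fmtAll_append, hps]
      cases hf : pvFormat (last, val) with
      | none => simp [pvFmtAll, hf]
      | some s => simp [pvFmtAll, hf, pv_join_snoc, String.append_assoc]
  | cons reg rest ih =>
      intro last val cr ps hlast hps
      rw [pvLoopA, pvLoopB]
      cases hfw : (PySem.Str.split₀ reg.2.2.1).head? with
      | none => simp [pvFinishA, pvFinishB]
      | some curr =>
          simp only
          by_cases hc : curr = last
          · subst hc
            rw [if_neg (by simp), if_pos (by simp)]
            exact ih curr (val ++ reg.2.2.2) cr ps hlast hps
          · rw [if_pos hc, if_neg (by simpa using fun h => hc h.symm),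
              pv_format_eq last val strings hlast]
            cases hf : pvFormat (last, val) with
            | none =>
                show pvFinishA strings none = _
                rw [pvFinishA]
                exact (pv_finishB_bad rest (curr, reg.2.2.2) ((last, val) :: cr)
                  ⟨(last, val), List.mem_cons_self, hf⟩).symm
            | some s =>
                show pvFinishA strings
                    (pvLoopA strings (PySem.Str.join "" ps ++ s, curr, reg.2.2.2) rest) = _
                rw [show PySem.Str.join "" ps ++ s = PySem.Str.join "" (ps ++ [s]) from
                  (pv_join_snoc ps s).symm]
                refine ih curr reg.2.2.2 ((last, val) :: cr) (ps ++ [s])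
                  (pv_head_split0_ne_empty hfw) ?_
                have hr : ((last, val) :: cr).reverse = cr.reverse ++ [(last, val)] := by simp
                rw [hr, pv_fmtAll_append, hps]
                simp [pvFmtAll, hf]

theorem pv_to_dt_eq (key : List (String × String × String × String)) (strings : List String) :
    to_dt key strings = to_dt_alt key strings := by
  unfold to_dt to_dt_alt
  cases key with
  | nil => rfl
  | cons reg rest =>
      rw [pvLoopA, pvLoopB]
      cases hfw : (PySem.Str.split₀ reg.2.2.1).head? with
      | none => simp [pvFinishA, pvFinishB]
      | some curr =>
          have hcurr : curr ≠ "" := pv_head_split0_ne_empty hfw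
          simp only
          rw [if_pos hcurr]
          have h2 : last_val_to_str "" "x" strings = some "" := rfl
          rw [h2]
          show pvFinishA strings (pvLoopA strings ("" ++ "", curr, reg.2.2.2) rest)
            = pvFinishB (pvLoopB [(curr, reg.2.2.2)] rest)
          have h1 : ("" : String) ++ "" = PySem.Str.join "" [] := by decide
          rw [h1]
          exact pv_main strings rest curr reg.2.2.2 [] [] hcurr rfl

-- ===== VERDICT (by name: the statement is the Claim_ definition above) =====
theorem to_dt_spec : Claim_equal_to_dt := by
  intro key strings _ _
  unfold Spec_to_dt
  exact pv_to_dt_eq key strings
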